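-- pv_equiv track=rewrite | github.com/mlcommons/ck | cm/cmind/utils.py | tags_matched
-- ===== SOURCE A (Python) =====
-- def tags_matched(tags, and_tags, no_tags):
--     """
--     Check if AND tags and NO tags match tags
--
--     Args:
--         tags (list of str): full list of tags
--         and_tags (list of str): list of AND tags
--         no_tags (list of str): list of NO tags
--
--     Returns:
--         True if tags matched
--
--     """
--
--     matched = True
--
--     if len(and_tags)>0:
--         if not all(t in tags for t in and_tags):
--             matched = False
--
--     if matched and len(no_tags)>0:
--         for t in no_tags:
--             if t in tags:
--                 matched = False
--                 break
--
--     return matched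
-- ===== SOURCE B (Python) =====
-- def tags_matched(tags, and_tags, no_tags):
--     needed = set(and_tags)
--     forbidden = set(no_tags)
--     for t in tags:
--         if t in forbidden:
--             return False
--         needed.discard(t)
--     return not needed
-- ===== Notes on version B (the rewrite author's own statement) =====
-- stated objective: alternative
-- what changed: Single pass over the data list tags with a shrinking required-set and a forbidden-set (early False on a forbidden tag), instead of A's two separate scans over and_tags and no_tags each doing a membership scan of tags.
import Mathlib
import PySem

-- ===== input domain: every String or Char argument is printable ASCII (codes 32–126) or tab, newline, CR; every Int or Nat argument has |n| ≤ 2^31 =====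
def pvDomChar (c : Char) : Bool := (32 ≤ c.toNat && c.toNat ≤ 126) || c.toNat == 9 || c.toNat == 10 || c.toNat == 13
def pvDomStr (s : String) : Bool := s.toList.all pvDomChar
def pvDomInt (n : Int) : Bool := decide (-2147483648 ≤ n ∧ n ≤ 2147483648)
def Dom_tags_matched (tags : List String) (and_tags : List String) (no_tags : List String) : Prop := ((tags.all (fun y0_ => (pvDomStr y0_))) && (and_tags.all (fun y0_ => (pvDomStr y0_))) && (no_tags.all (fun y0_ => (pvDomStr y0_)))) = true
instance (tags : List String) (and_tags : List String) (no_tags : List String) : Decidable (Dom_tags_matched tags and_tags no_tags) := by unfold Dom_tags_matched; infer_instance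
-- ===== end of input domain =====

-- B replaces A's two scans over and_tags/no_tags by one pass over tags with a shrinking
-- required-set and a forbidden-set (objective: alternative decomposition, same result).

-- ===== PORT A =====
-- the 'for t in no_tags: if t in tags: matched = False; break' loop
def noLoopA (tags : List String) : List String → Bool
  | [] => true
  | t :: rest => if tags.contains t then false else noLoopA tags rest

def tags_matched (tags : List String) (and_tags : List String) (no_tags : List String) : Bool :=
  let matched := true
  let matched :=
    if and_tags.length > 0 then
      if ¬ (and_tags.all (fun t => tags.contains t)) then false else matched
    else matched
  if matched && no_tags.length > 0 then noLoopA tags no_tags else matched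

-- ===== PORT B =====
-- the 'for t in tags: …' loop with early False and needed.discard(t)
def bScan (forbidden : PySem.Set String) : PySem.Set String → List String → Bool
  | needed, [] => needed.isEmpty
  | needed, t :: rest =>
      if PySem.Set.contains forbidden t then false
      else bScan forbidden (PySem.Set.discard needed t) rest

def tags_matched_alt (tags : List String) (and_tags : List String) (no_tags : List String) : Bool :=
  bScan (PySem.Set.ofList no_tags) (PySem.Set.ofList and_tags) tags

-- ===== PRECONDITION & SPEC =====
def Spec_tags_matched (tags : List String) (and_tags : List String) (no_tags : List String) (out : Bool) : Prop := out = tags_matched_alt tags and_tags no_tags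
instance (tags : List String) (and_tags : List String) (no_tags : List String) (out : Bool) : Decidable (Spec_tags_matched tags and_tags no_tags out) := by unfold Spec_tags_matched; infer_instance

-- ===== CLAIM (what is proved, stated in full; the proofs are below) =====
def Claim_equal_tags_matched : Prop := ∀ (tags : List String) (and_tags : List String) (no_tags : List String), Dom_tags_matched tags and_tags no_tags → Spec_tags_matched tags and_tags no_tags (tags_matched tags and_tags no_tags)

-- ===== LEMMAS AND PROOFS =====

theorem noLoopA_eq (tags : List String) (l : List String) :
    noLoopA tags l = l.all (fun t => !tags.contains t) := by
  induction l with
  | nil => rfl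
  | cons t rest ih =>
    simp only [noLoopA, List.all_cons]
    by_cases h : tags.contains t <;> simp [h, ih]

theorem tags_matched_eq (tags and_tags no_tags : List String) :
    tags_matched tags and_tags no_tags =
      ((and_tags.all (fun t => tags.contains t)) &&
       (no_tags.all (fun t => !tags.contains t))) := by
  unfold tags_matched
  split_ifs with h1 h2 <;>
    rw [Bool.eq_iff_iff] <;>
    simp_all [noLoopA_eq, List.all_eq_true, List.length_pos_iff]

theorem bScan_eq (forbidden : PySem.Set String) (needed : PySem.Set String) (ts : List String) :
    bScan forbidden needed ts =
      ((ts.all (fun t => !PySem.Set.contains forbidden t)) &&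
       decide (∀ x ∈ needed, x ∈ ts)) := by
  induction ts generalizing needed with
  | nil =>
    cases needed with
    | nil => simp [bScan]
    | cons x xs =>
      have hd : decide (∀ y ∈ x :: xs, y ∈ ([] : List String)) = false := by
        simp only [decide_eq_false_iff_not, not_forall]
        exact ⟨x, by simp⟩
      simp [bScan, hd]
  | cons t rest ih =>
    simp only [bScan, List.all_cons]
    by_cases h : t ∈ forbidden
    · simp [h, PySem.Set.contains_eq_listContains]
    · rw [if_neg (by simp [PySem.Set.contains_eq_listContains, h]), ih]
      have hc : (!PySem.Set.contains forbidden t) = true := by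
        simp [PySem.Set.contains_eq_listContains, h]
      rw [hc, Bool.true_and]
      congr 1
      simp only [PySem.Set.mem_discard, decide_eq_decide, and_imp, List.mem_cons]
      constructor
      · intro hh x hx
        by_cases hxt : x = t
        · exact Or.inl hxt
        · exact Or.inr (hh x hx hxt)
      · intro hh x hx hxt
        rcases hh x hx with h1 | h1
        · exact absurd h1 hxt
        · exact h1

-- ===== VERDICT (by name: the statement is the Claim_ definition above) =====
theorem tags_matched_spec : Claim_equal_tags_matched := by
  intro tags and_tags no_tags _
  unfold Spec_tags_matched tags_matched_alt
  rw [tags_matched_eq, bScan_eq, Bool.eq_iff_iff]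
  simp only [Bool.and_eq_true, List.all_eq_true, Bool.not_eq_true', Bool.eq_false_iff, ne_eq,
    List.contains_iff_mem, decide_eq_true_eq, PySem.Set.contains_eq_listContains,
    PySem.Set.mem_ofList]
  constructor
  · rintro ⟨h1, h2⟩
    exact ⟨fun t ht hn => (h2 t hn) ht, h1⟩
  · rintro ⟨h1, h2⟩
    exact ⟨h2, fun t hn ht => (h1 t ht) hn⟩
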